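-- pv_equiv track=rewrite | github.com/supreeth4084/web_scraping-NLP | nlp.py | is_two_syllables
-- ===== SOURCE A (Python) =====
-- def is_two_syllables(word):
--
--     vowels = 'aeiouyAEIOUY'
--     vowel_count = 0
--     consecutive_consonants = 0
--
--     for char in word:
--         if char in vowels:
--             vowel_count += 1
--             consecutive_consonants = 0  # reset on vowel
--         else:
--             consecutive_consonants += 1
--         # exceptions for single consonant followed by silent 'e'
--         if consecutive_consonants > 2 and word[-1] == 'e':
--             consecutive_consonants -= 1
--
-- # Two syllables if there are at least two vowels and no more than two consecutive consonants
--     return vowel_count >= 2 and consecutive_consonants <= 2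
-- ===== SOURCE B (Python) =====
-- def is_two_syllables(word):
--     vowels = 'aeiouyAEIOUY'
--     vowel_count = sum(1 for c in word if c in vowels)
--     trailing = 0
--     for c in reversed(word):
--         if c in vowels:
--             break
--         trailing += 1
--     return vowel_count >= 2 and trailing <= 2
-- ===== Notes on version B (the rewrite author's own statement) =====
-- stated objective: simpler
-- what changed: Replaces A's single-pass stateful counter with its conditional silent-'e' decrement (provably dead for the final value) by two straightforward passes: count vowels, then measure the trailing consonant run from the end.
import Mathlib
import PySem

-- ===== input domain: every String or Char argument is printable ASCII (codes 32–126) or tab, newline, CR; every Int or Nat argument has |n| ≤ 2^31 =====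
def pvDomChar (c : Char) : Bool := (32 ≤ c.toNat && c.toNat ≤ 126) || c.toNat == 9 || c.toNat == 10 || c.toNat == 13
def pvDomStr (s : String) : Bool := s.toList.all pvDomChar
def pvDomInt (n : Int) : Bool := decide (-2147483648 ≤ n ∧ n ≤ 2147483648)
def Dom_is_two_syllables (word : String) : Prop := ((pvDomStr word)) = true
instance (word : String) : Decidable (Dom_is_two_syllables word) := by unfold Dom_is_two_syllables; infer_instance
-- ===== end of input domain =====

-- B replaces A's stateful single-pass counter (with its dead silent-'e' branch) by two plain passes:
-- count the vowels, then measure the trailing consonant run from the end; same result, simpler.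


-- ===== PORT A =====
-- one loop iteration of A: vowel check, then the conditional silent-'e' decrement
def aStep (last : Option Char) (s : Int × Int) (c : Char) : Int × Int :=
  let s' := if ("aeiouyAEIOUY".toList).contains c then (s.1 + 1, (0 : Int)) else (s.1, s.2 + 1)
  if 2 < s'.2 then (if last == some 'e' then (s'.1, s'.2 - 1) else s') else s'

def is_two_syllables (word : String) : Bool :=
  let s := word.toList.foldl (aStep (PySem.Str.pyGet? word (-1))) (0, 0)
  decide (2 ≤ s.1 ∧ s.2 ≤ 2)

-- ===== PORT B =====
-- B's break-loop over reversed(word): length of the leading non-vowel run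
def bTrail : List Char → Int
  | [] => 0
  | c :: rest => if ("aeiouyAEIOUY".toList).contains c then 0 else bTrail rest + 1

def is_two_syllables_alt (word : String) : Bool :=
  let vowel_count : Int := ((word.toList.filter (fun c => ("aeiouyAEIOUY".toList).contains c)).length : Int)
  let trailing : Int := bTrail word.toList.reverse
  decide (2 ≤ vowel_count ∧ trailing ≤ 2)

-- ===== PRECONDITION & SPEC =====
def Spec_is_two_syllables (word : String) (out : Bool) : Prop := out = is_two_syllables_alt word
instance (word : String) (out : Bool) : Decidable (Spec_is_two_syllables word out) := by unfold Spec_is_two_syllables; infer_instance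

-- ===== CLAIM (what is proved, stated in full; the proofs are below) =====
def Claim_equal_is_two_syllables : Prop := ∀ (word : String), Dom_is_two_syllables word → Spec_is_two_syllables word (is_two_syllables word)

-- ===== LEMMAS AND PROOFS =====

-- a full case analysis of one iteration of A's loop
theorem aStep_eq (last : Option Char) (s : Int × Int) (c : Char) :
    aStep last s c =
      if ("aeiouyAEIOUY".toList).contains c then (s.1 + 1, (0 : Int))
      else if 2 < s.2 + 1 then (if last == some 'e' then (s.1, s.2) else (s.1, s.2 + 1))
      else (s.1, s.2 + 1) := by
  unfold aStep
  by_cases hc : ("aeiouyAEIOUY".toList).contains c = true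
  · rw [if_pos hc, if_pos hc, if_neg (by norm_num)]
  · rw [if_neg hc, if_neg hc]
    split_ifs <;> simp <;> omega

theorem aStep_fst (last : Option Char) (s : Int × Int) (c : Char) :
    (aStep last s c).1 = if ("aeiouyAEIOUY".toList).contains c then s.1 + 1 else s.1 := by
  rw [aStep_eq]; split_ifs <;> rfl

theorem foldl_fst (last : Option Char) (l : List Char) (init : Int × Int) :
    (l.foldl (aStep last) init).1
      = init.1 + ((l.filter (fun c => ("aeiouyAEIOUY".toList).contains c)).length : Int) := by
  induction l generalizing init with
  | nil => simp
  | cons c rest ih =>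
      rw [List.foldl_cons, ih, List.filter_cons, aStep_fst]
      split_ifs <;> simp <;> omega

-- processing a final vowel resets the counter to 0 regardless of the branch
theorem aStep_snd_vowel (last : Option Char) (s : Int × Int) (c : Char)
    (h : ("aeiouyAEIOUY".toList).contains c = true) : (aStep last s c).2 = 0 := by
  rw [aStep_eq, if_pos h]

-- when the last character is not 'e', the decrement branch never fires
theorem aStep_of_ne (last : Option Char) (s : Int × Int) (c : Char)
    (h : (last == some 'e') = false) :
    aStep last s c = if ("aeiouyAEIOUY".toList).contains c then (s.1 + 1, (0 : Int))
      else (s.1, s.2 + 1) := by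
  rw [aStep_eq, h]
  split_ifs <;> first | rfl | contradiction

-- with the branch dead, the counter is the trailing consonant run (or grows from init if no vowel)
theorem foldl_snd_ne (last : Option Char) (l : List Char) (init : Int × Int)
    (h : (last == some 'e') = false) :
    (l.foldl (aStep last) init).2
      = if l.any (fun c => ("aeiouyAEIOUY".toList).contains c) then bTrail l.reverse
        else init.2 + (l.length : Int) := by
  induction l using List.reverseRecOn generalizing init with
  | nil => simp
  | append_singleton l' c ih =>
      rw [List.foldl_append, List.foldl_cons, List.foldl_nil, aStep_of_ne _ _ _ h,
        List.reverse_append]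
      by_cases hc : ("aeiouyAEIOUY".toList).contains c = true
      · rw [if_pos hc]
        have hany : (l' ++ [c]).any (fun c => ("aeiouyAEIOUY".toList).contains c) = true := by
          simp only [List.any_append, List.any_cons, List.any_nil, hc, Bool.or_true, Bool.true_or]
        rw [if_pos hany]
        simp only [List.reverse_cons, List.reverse_nil, List.nil_append, List.cons_append,
          bTrail, if_pos hc]
      · rw [if_neg hc]
        have hrw : (l' ++ [c]).any (fun c => ("aeiouyAEIOUY".toList).contains c)
            = l'.any (fun c => ("aeiouyAEIOUY".toList).contains c) := by
          simp only [List.any_append, List.any_cons, List.any_nil, hc, Bool.or_false]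
        rw [hrw]
        simp only [List.reverse_cons, List.reverse_nil, List.nil_append, List.cons_append]
        rw [show bTrail (c :: l'.reverse) = bTrail l'.reverse + 1 by
          simp only [bTrail, if_neg hc]]
        by_cases hany : l'.any (fun c => ("aeiouyAEIOUY".toList).contains c) = true
        · rw [if_pos hany]
          have := ih init
          rw [if_pos hany] at this
          simp [this]
        · rw [if_neg hany]
          have := ih init
          rw [if_neg hany] at this
          rw [this]
          simp only [List.length_append, List.length_cons, List.length_nil]
          push_cast
          ring

theorem any_of_two_vowels (l : List Char)
    (h : 2 ≤ (((l.filter (fun c => ("aeiouyAEIOUY".toList).contains c)).length : Int))) :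
    l.any (fun c => ("aeiouyAEIOUY".toList).contains c) = true := by
  rcases hf : l.filter (fun c => ("aeiouyAEIOUY".toList).contains c) with _ | ⟨c, rest⟩
  · rw [hf] at h; norm_num at h
  · have hm : c ∈ l.filter (fun c => ("aeiouyAEIOUY".toList).contains c) := by
      rw [hf]; exact List.mem_cons_self
    rw [List.mem_filter] at hm
    exact List.any_eq_true.mpr ⟨c, hm.1, hm.2⟩

-- ===== VERDICT (by name: the statement is the Claim_ definition above) =====
theorem is_two_syllables_spec : Claim_equal_is_two_syllables := by
  intro word _
  unfold Spec_is_two_syllables is_two_syllables is_two_syllables_alt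
  dsimp only
  rcases List.eq_nil_or_concat word.toList with hnil | ⟨l', c, hlc⟩
  · simp [hnil]
  · rw [List.concat_eq_append] at hlc
    have hfst := foldl_fst (PySem.Str.pyGet? word (-1)) word.toList (0, 0)
    simp only [Int.zero_add] at hfst
    by_cases hv : 2 ≤ (((word.toList.filter (fun c => ("aeiouyAEIOUY".toList).contains c)).length : Int))
    · -- at least two vowels: second components agree
      have hany := any_of_two_vowels word.toList hv
      by_cases hc : ("aeiouyAEIOUY".toList).contains c = true
      · -- word ends in a vowel: both counters are 0
        have hsnd : (word.toList.foldl (aStep (PySem.Str.pyGet? word (-1))) (0, 0)).2 = 0 := by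
          rw [hlc, List.foldl_append, List.foldl_cons, List.foldl_nil,
            aStep_snd_vowel _ _ _ hc]
        have htr : bTrail word.toList.reverse = 0 := by
          rw [hlc, List.reverse_append]
          simp only [List.reverse_cons, List.reverse_nil, List.nil_append, List.cons_append,
            bTrail, if_pos hc]
        rw [hfst, hsnd, htr]
      · -- word ends in a consonant: it is not 'e', so the branch is dead
        have hce : c ≠ 'e' := by
          intro hEq; rw [hEq] at hc; simp at hc
        have hlast : (PySem.Str.pyGet? word (-1) == some 'e') = false := by
          have hsome : PySem.Str.pyGet? word (-1) = some c := by
            rw [PySem.Str.pyGet?_eq, PySem.Chars.pyGet?_eq_listPyGet?, hlc,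
              PySem.List.pyGet?_neg_one_append_singleton]
          rw [hsome]
          simp [hce]
        have hsnd := foldl_snd_ne (PySem.Str.pyGet? word (-1)) word.toList (0, 0) hlast
        rw [if_pos hany] at hsnd
        rw [hfst, hsnd]
    · -- fewer than two vowels: both sides are false
      have h1 : decide (2 ≤ (word.toList.foldl (aStep (PySem.Str.pyGet? word (-1))) (0, 0)).1
          ∧ (word.toList.foldl (aStep (PySem.Str.pyGet? word (-1))) (0, 0)).2 ≤ 2) = false := by
        rw [decide_eq_false_iff_not]
        rintro ⟨ha, -⟩
        rw [hfst] at ha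
        exact hv ha
      have h2 : decide (2 ≤ ((word.toList.filter (fun c => ("aeiouyAEIOUY".toList).contains c)).length : Int)
          ∧ bTrail word.toList.reverse ≤ 2) = false := by
        rw [decide_eq_false_iff_not]
        rintro ⟨ha, -⟩
        exact hv ha
      exact h1.trans h2.symm
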